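-- pv_equiv track=rewrite | github.com/jluscher/SCANIT | scanit_v033.py | floatOnly
-- ===== SOURCE A (Python) =====
-- import sys, string, time
--
-- def floatOnly(text):
--     '''get StringVar's value as float().'''
--     point = False
--     s = ''
--     r = ''
--     for c in text:
--         if point == False:      # no decimal yet
--             if c in string.digits:
--                 s = s + c
--             elif c == '.':
--                 point = True
--         else:
--             if c in string.digits:
--                 r = r + c
--     # supress leading zeros
--     s = s.lstrip('0')
--     # but keep at least one zero(!)
--     if len(s) == 0:
--         s = '0'
--     # resolution limited to mS
--     if len(r) > 3:
--         r = r[0:3]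
--     s = s+ '.' +r
--     return s
-- ===== SOURCE B (Python) =====
-- import string
--
-- def floatOnly(text):
--     '''get StringVar's value as float().'''
--     s = ''
--     r = ''
--     for c in reversed(text):
--         if c == '.':
--             # this dot is now the earliest seen: everything collected so far
--             # (digits of the suffix) belongs after the first dot
--             s, r = '', s + r
--         elif c in string.digits:
--             s = c + s
--     s = s.lstrip('0') or '0'
--     return s + '.' + r[:3]
-- ===== Notes on version B (the rewrite author's own statement) =====
-- stated objective: alternative
-- what changed: Replaced A's forward scan with a before/after-dot flag by a single right-to-left pass that prepends digits and, at each dot, shifts everything collected so far into the fractional part, so the last shift corresponds to the first dot and no flag is needed.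
import Mathlib
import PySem

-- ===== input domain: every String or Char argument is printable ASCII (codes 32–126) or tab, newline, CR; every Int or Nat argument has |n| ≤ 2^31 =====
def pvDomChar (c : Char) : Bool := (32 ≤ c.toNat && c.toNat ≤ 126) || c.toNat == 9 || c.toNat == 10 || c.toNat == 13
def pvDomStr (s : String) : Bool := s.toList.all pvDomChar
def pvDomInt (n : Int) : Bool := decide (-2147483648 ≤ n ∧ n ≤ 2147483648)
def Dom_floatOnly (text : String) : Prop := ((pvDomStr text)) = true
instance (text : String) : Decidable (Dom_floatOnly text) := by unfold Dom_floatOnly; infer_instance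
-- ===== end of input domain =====

-- B replaces A's forward flagged scan by a right-to-left pass that shifts accumulated digits past each dot (alternative decomposition, same cost).


-- ===== PORT A =====
-- the `for c in text` loop over state (point, s, r)
def floatOnlyLoop : List Char → Bool → List Char → List Char → List Char × List Char
  | [], _, s, r => (s, r)
  | c :: cs, point, s, r =>
    if point = false then
      if c.isDigit then floatOnlyLoop cs point (s ++ [c]) r
      else if c = '.' then floatOnlyLoop cs true s r
      else floatOnlyLoop cs point s r
    else
      if c.isDigit then floatOnlyLoop cs point s (r ++ [c])
      else floatOnlyLoop cs point s r

def floatOnly (text : String) : String :=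
  let p := floatOnlyLoop text.toList false [] []
  let s := p.1.dropWhile (· = '0')          -- s.lstrip('0')
  let s := if s.length = 0 then ['0'] else s
  let r := if p.2.length > 3 then p.2.take 3 else p.2
  String.mk (s ++ '.' :: r)

-- ===== PORT B =====
-- the `for c in reversed(text)` loop body (a right fold processes the leftmost char last)
def floatOnlyAltStep (c : Char) (sr : List Char × List Char) : List Char × List Char :=
  if c = '.' then ([], sr.1 ++ sr.2)
  else if c.isDigit then (c :: sr.1, sr.2)
  else sr

def floatOnly_alt (text : String) : String :=
  let p := text.toList.foldr floatOnlyAltStep ([], [])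
  let s := p.1.dropWhile (· = '0')
  String.mk ((if s.length = 0 then ['0'] else s) ++ '.' :: p.2.take 3)

-- ===== PRECONDITION & SPEC =====
def Spec_floatOnly (text : String) (out : String) : Prop := out = floatOnly_alt text
instance (text : String) (out : String) : Decidable (Spec_floatOnly text out) := by unfold Spec_floatOnly; infer_instance

-- ===== CLAIM (what is proved, stated in full; the proofs are below) =====
def Claim_equal_floatOnly : Prop := ∀ (text : String), Dom_floatOnly text → Spec_floatOnly text (floatOnly text)

-- ===== LEMMAS AND PROOFS =====
-- A's loop after the first dot collects exactly the remaining digits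
lemma loop_true (cs : List Char) (s r : List Char) :
    floatOnlyLoop cs true s r = (s, r ++ cs.filter Char.isDigit) := by
  induction cs generalizing r with
  | nil => simp [floatOnlyLoop]
  | cons c cs ih =>
    by_cases h : c.isDigit <;> simp [floatOnlyLoop, h, ih, List.filter_cons]

-- closed form of A's loop from the initial state
lemma loop_false (cs : List Char) (s r : List Char) :
    floatOnlyLoop cs false s r =
      (s ++ (cs.takeWhile (· ≠ '.')).filter Char.isDigit,
       r ++ ((cs.dropWhile (· ≠ '.')).drop 1).filter Char.isDigit) := by
  induction cs generalizing s with
  | nil => simp [floatOnlyLoop]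
  | cons c cs ih =>
    by_cases hd : c.isDigit
    · have hne : c ≠ '.' := by
        intro h; subst h; simp [Char.isDigit] at hd
      simp [floatOnlyLoop, hd, hne, ih, List.takeWhile_cons, List.dropWhile_cons,
        List.filter_cons]
    · by_cases hp : c = '.'
      · subst hp
        simp [floatOnlyLoop, hd, loop_true, List.takeWhile_cons, List.dropWhile_cons,
          List.filter_cons]
      · simp [floatOnlyLoop, hd, hp, ih, List.takeWhile_cons, List.dropWhile_cons,
          List.filter_cons]

-- splitting a digit-filter at the first dot loses nothing (the dot itself is no digit)
lemma filter_split (cs : List Char) :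
    (cs.takeWhile (· ≠ '.')).filter Char.isDigit
      ++ ((cs.dropWhile (· ≠ '.')).drop 1).filter Char.isDigit
      = cs.filter Char.isDigit := by
  induction cs with
  | nil => simp
  | cons c cs ih =>
    simp only [ne_eq, decide_not, List.drop_one] at ih
    by_cases hp : c = '.'
    · subst hp
      simp [List.takeWhile_cons, List.dropWhile_cons, List.filter_cons, Char.isDigit]
    · by_cases hd : c.isDigit <;>
        simp [List.takeWhile_cons, List.dropWhile_cons, List.filter_cons, hp, hd, ih]
-- closed form of B's right fold: same before/after-first-dot pair
lemma foldr_spec (cs : List Char) :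
    cs.foldr floatOnlyAltStep ([], []) =
      ((cs.takeWhile (· ≠ '.')).filter Char.isDigit,
       ((cs.dropWhile (· ≠ '.')).drop 1).filter Char.isDigit) := by
  induction cs with
  | nil => simp
  | cons c cs ih =>
    by_cases hp : c = '.'
    · subst hp
      simp [List.foldr_cons, ih, floatOnlyAltStep]
      simpa [List.drop_one] using filter_split cs
    · by_cases hd : c.isDigit <;>
        simp [List.foldr_cons, ih, floatOnlyAltStep, hp, hd,
          List.takeWhile_cons, List.dropWhile_cons, List.filter_cons]

-- ===== VERDICT (by name: the statement is the Claim_ definition above) =====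
theorem floatOnly_spec : Claim_equal_floatOnly := by
  intro text _
  show floatOnly text = floatOnly_alt text
  unfold floatOnly floatOnly_alt
  rw [loop_false, foldr_spec]
  simp only [List.nil_append]
  congr 1
  by_cases h : (((text.toList.dropWhile (· ≠ '.')).drop 1).filter Char.isDigit).length > 3
  · simp [h]
  · rw [if_neg h, List.take_of_length_le (by omega)]
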